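-- pv_equiv track=rewrite | github.com/pauloBFalmeida/trabalhoFormais | teste.py | traduzir
-- ===== SOURCE A (Python) =====
-- def traduzir(conjunto, estados):
--     k = 0
--     for i in range(estados):
--         if i in conjunto:
--             k = (k << 1) + 1
--         else:
--             k = k << 1
--     return k
-- ===== SOURCE B (Python) =====
-- def traduzir(conjunto, estados):
--     return sum(1 << (estados - 1 - i) for i in set(conjunto) if 0 <= i < estados)
-- ===== Notes on version B (the rewrite author's own statement) =====
-- stated objective: faster
-- what changed: Replaces the O(estados*|conjunto|) loop over every bit position (with a linear membership scan per position) by a direct sum of 1<<(estados-1-i) over the distinct in-range elements of conjunto.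
import Mathlib
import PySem

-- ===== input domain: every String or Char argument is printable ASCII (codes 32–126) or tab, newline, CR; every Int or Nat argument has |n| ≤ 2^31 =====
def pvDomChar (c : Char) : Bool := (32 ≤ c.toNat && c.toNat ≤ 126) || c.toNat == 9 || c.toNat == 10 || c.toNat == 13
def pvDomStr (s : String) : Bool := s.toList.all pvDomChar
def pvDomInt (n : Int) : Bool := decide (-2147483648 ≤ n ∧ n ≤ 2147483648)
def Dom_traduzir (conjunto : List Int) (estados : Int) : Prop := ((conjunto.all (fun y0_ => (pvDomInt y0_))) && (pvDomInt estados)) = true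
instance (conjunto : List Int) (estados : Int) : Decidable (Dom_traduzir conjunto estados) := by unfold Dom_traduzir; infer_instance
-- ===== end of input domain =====

-- B replaces the per-position loop by a direct sum over the distinct in-range elements (faster: O(|conjunto|) instead of O(estados*|conjunto|)).

-- ===== PORT A =====
-- for i in range(estados): k = (k << 1) + 1 if i in conjunto else k << 1
-- (k << 1 is 2*k: k is built from 0 by these steps, so it is nonnegative throughout)
def traduzir (conjunto : List Int) (estados : Int) : Int :=
  (PySem.List.pyRange 0 estados 1).foldl
    (fun k i => if conjunto.contains i then 2 * k + 1 else 2 * k) 0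

-- ===== PORT B =====
-- sum(1 << (estados-1-i) for i in set(conjunto) if 0 <= i < estados)
-- (1 << n = 2^n; the exponent is nonnegative under the filter, so .toNat is exact;
--  summing ints over a Python set is order-independent, so Set.ofList's order is fine)
def traduzir_alt (conjunto : List Int) (estados : Int) : Int :=
  (((PySem.Set.ofList conjunto).filter (fun i => decide (0 ≤ i ∧ i < estados))).map
    (fun i => (2 : Int) ^ (estados - 1 - i).toNat)).sum

-- ===== PRECONDITION & SPEC =====
def Spec_traduzir (conjunto : List Int) (estados : Int) (out : Int) : Prop := out = traduzir_alt conjunto estados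
instance (conjunto : List Int) (estados : Int) (out : Int) : Decidable (Spec_traduzir conjunto estados out) := by unfold Spec_traduzir; infer_instance

-- ===== CLAIM (what is proved, stated in full; the proofs are below) =====
def Claim_equal_traduzir : Prop := ∀ (conjunto : List Int) (estados : Int), Dom_traduzir conjunto estados → Spec_traduzir conjunto estados (traduzir conjunto estados)

-- ===== LEMMAS AND PROOFS =====

-- the per-element contribution of B, as a total function
def pvG (est i : Int) : Int := if 0 ≤ i ∧ i < est then (2 : Int) ^ (est - 1 - i).toNat else 0

theorem pvB_eq_sum_map (conjunto : List Int) (estados : Int) :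
    traduzir_alt conjunto estados = ((PySem.Set.ofList conjunto).map (pvG estados)).sum := by
  unfold traduzir_alt
  generalize (PySem.Set.ofList conjunto : List Int) = L
  induction L with
  | nil => simp
  | cons a l ih =>
    by_cases h : (0 ≤ a ∧ a < estados)
    · rw [List.filter_cons_of_pos (by simpa using h), List.map_cons, List.sum_cons, ih,
          List.map_cons, List.sum_cons]
      simp [pvG, h]
    · rw [List.filter_cons_of_neg (by simpa using h), ih, List.map_cons, List.sum_cons]
      simp [pvG, h]

theorem pvG_succ (n : Int) (a : Int) (ha : a ≠ n) : pvG (n + 1) a = 2 * pvG n a := by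
  unfold pvG
  by_cases h1 : 0 ≤ a
  · by_cases h2 : a < n
    · have h3 : a < n + 1 := by omega
      simp only [h1, h2, h3, and_self, if_true]
      have : (n + 1 - 1 - a).toNat = (n - 1 - a).toNat + 1 := by omega
      rw [this, pow_succ]; ring
    · have h3 : ¬ a < n + 1 := by omega
      simp [h2, h3]
  · simp [h1]

theorem pvSum_succ (L : List Int) (hnd : L.Nodup) (n : Int) (hn : 0 ≤ n) :
    (L.map (pvG (n + 1))).sum = 2 * (L.map (pvG n)).sum + (if n ∈ L then 1 else 0) := by
  induction L with
  | nil => simp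
  | cons a l ih =>
    have hal : a ∉ l := (List.nodup_cons.mp hnd).1
    have ihl := ih (List.nodup_cons.mp hnd).2
    by_cases ha : a = n
    · subst ha
      have h1 : pvG (a + 1) a = 1 := by
        have : (a + 1 - 1 - a).toNat = 0 := by omega
        simp [pvG, hn]
      have h2 : pvG a a = 0 := by simp [pvG]
      simp [h1, h2, ihl, hal]
      ring
    · have hmem : (n ∈ a :: l) ↔ (n ∈ l) := by
        constructor
        · intro h
          rcases List.mem_cons.mp h with h | h
          · exact absurd h.symm ha
          · exact h
        · exact fun h => List.mem_cons_of_mem a h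
      simp only [List.map_cons, List.sum_cons, pvG_succ n a ha, ihl, if_congr hmem rfl rfl]
      ring

theorem pvA_zero_of_nonpos (conjunto : List Int) (estados : Int) (h : estados ≤ 0) :
    traduzir conjunto estados = 0 := by
  unfold traduzir
  rw [PySem.List.pyRange_one_eq_nil h]
  rfl

theorem pvG_zero_of_nonpos (estados i : Int) (h : estados ≤ 0) : pvG estados i = 0 := by
  unfold pvG
  have : ¬ (0 ≤ i ∧ i < estados) := by omega
  simp [this]

theorem pvMain (conjunto : List Int) (n : Nat) :
    traduzir conjunto (n : Int) = ((PySem.Set.ofList conjunto).map (pvG (n : Int))).sum := by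
  induction n with
  | zero =>
    rw [show ((0 : Nat) : Int) = 0 from rfl, pvA_zero_of_nonpos conjunto 0 le_rfl]
    have : ∀ i ∈ (PySem.Set.ofList conjunto : List Int), pvG 0 i = 0 := fun i _ =>
      pvG_zero_of_nonpos 0 i le_rfl
    rw [List.map_congr_left (fun i hi => this i hi)]
    simp
  | succ m ih =>
    have hcast : ((m + 1 : Nat) : Int) = (m : Int) + 1 := by push_cast; ring
    rw [hcast]
    -- A side: peel the last index off the range
    have hA : traduzir conjunto ((m : Int) + 1) =
        (if conjunto.contains (m : Int) then 2 * traduzir conjunto (m : Int) + 1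
         else 2 * traduzir conjunto (m : Int)) := by
      unfold traduzir
      rw [PySem.List.pyRange_one_succ_right (by positivity : (0 : Int) ≤ (m : Int)),
          List.foldl_append]
      rfl
    rw [hA, ih]
    -- B side: the sum recurrence
    have hS := pvSum_succ (PySem.Set.ofList conjunto) (PySem.Set.nodup_ofList conjunto)
      (m : Int) (by positivity)
    rw [hS]
    have hmem : conjunto.contains (m : Int) = decide ((m : Int) ∈ (PySem.Set.ofList conjunto : List Int)) := by
      simp [PySem.Set.mem_ofList]
    rw [hmem]
    by_cases hm : (m : Int) ∈ (PySem.Set.ofList conjunto : List Int)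
    · simp [hm]
    · simp [hm]

-- ===== VERDICT (by name: the statement is the Claim_ definition above) =====
theorem traduzir_spec : Claim_equal_traduzir := by
  intro conjunto estados _
  unfold Spec_traduzir
  rw [pvB_eq_sum_map]
  by_cases h : estados ≤ 0
  · rw [pvA_zero_of_nonpos conjunto estados h]
    have : ∀ i ∈ (PySem.Set.ofList conjunto : List Int), pvG estados i = 0 := fun i _ =>
      pvG_zero_of_nonpos estados i h
    rw [List.map_congr_left (fun i hi => this i hi)]
    simp
  · have hn : estados = ((estados.toNat : Nat) : Int) := by omega
    rw [hn]
    exact pvMain conjunto estados.toNat
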